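-- pv_equiv track=rewrite | github.com/QinWeijia111/A-algorithm-demonstration | backend/algorithms/llm_astar.py | _compress_barriers
-- ===== SOURCE A (Python) =====
-- from typing import Tuple, List, Dict, Any, Optional
--
-- def _compress_barriers(obstacles: set, size: int) -> Tuple[List[List[int]], List[List[int]]]:
--     horizontal: List[List[int]] = []
--     vertical: List[List[int]] = []
--     # rows
--     for y in range(size):
--         xs = sorted([x for (x, yy) in obstacles if yy == y])
--         if not xs:
--             continue
--         start = xs[0]
--         prev = xs[0]
--         for x in xs[1:]:
--             if x == prev + 1:
--                 prev = x
--             else: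
--                 horizontal.append([y, start, prev])
--                 start = x
--                 prev = x
--         horizontal.append([y, start, prev])
--     # cols
--     for x in range(size):
--         ys = sorted([y for (xx, y) in obstacles if xx == x])
--         if not ys:
--             continue
--         start = ys[0]
--         prev = ys[0]
--         for y in ys[1:]:
--             if y == prev + 1:
--                 prev = y
--             else:
--                 vertical.append([x, start, prev])
--                 start = y
--                 prev = y
--         vertical.append([x, start, prev])
--     return horizontal[:200], vertical[:200]
-- ===== SOURCE B (Python) =====
-- def _compress_barriers(obstacles, size):
--     # One pass to bucket obstacle cells by row and by column, then emit runs
--     # for the occupied rows/columns in sorted order (no scan over range(size)).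
--     rows = {}
--     cols = {}
--     for (x, y) in obstacles:
--         rows.setdefault(y, []).append(x)
--         cols.setdefault(x, []).append(y)
--
--     def runs(key, vals):
--         vals.sort()
--         out = []
--         start = prev = vals[0]
--         for v in vals[1:]:
--             if v == prev + 1:
--                 prev = v
--             else:
--                 out.append([key, start, prev])
--                 start = prev = v
--         out.append([key, start, prev])
--         return out
--
--     horizontal = [r for y in sorted(rows) if 0 <= y < size for r in runs(y, rows[y])]
--     vertical = [r for x in sorted(cols) if 0 <= x < size for r in runs(x, cols[x])]
--     return horizontal[:200], vertical[:200]
-- ===== Notes on version B (the rewrite author's own statement) =====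
-- stated objective: faster
-- what changed: Instead of rescanning and re-sorting the whole obstacle set for every y and x in range(size), B buckets the obstacles by row and by column in one pass over the set and emits runs only for the occupied rows/columns, iterated in sorted key order.
import Mathlib
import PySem

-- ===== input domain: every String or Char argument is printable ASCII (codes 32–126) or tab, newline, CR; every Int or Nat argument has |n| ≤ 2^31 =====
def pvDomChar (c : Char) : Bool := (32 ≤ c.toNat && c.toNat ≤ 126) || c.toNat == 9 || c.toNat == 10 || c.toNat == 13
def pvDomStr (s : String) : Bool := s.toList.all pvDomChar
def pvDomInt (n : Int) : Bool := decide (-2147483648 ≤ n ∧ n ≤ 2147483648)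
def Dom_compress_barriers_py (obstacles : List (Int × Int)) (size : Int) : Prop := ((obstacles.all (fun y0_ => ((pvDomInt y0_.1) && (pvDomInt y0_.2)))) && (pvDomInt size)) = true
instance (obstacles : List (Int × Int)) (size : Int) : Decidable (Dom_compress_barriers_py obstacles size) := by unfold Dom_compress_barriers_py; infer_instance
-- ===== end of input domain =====

-- B buckets the obstacles by row/column in ONE pass over the set and emits runs only for
-- the occupied (sorted) rows/columns, instead of A's rescan of the whole set for every
-- y and x in range(size); objective: faster.

-- ===== PORT A =====
-- literal transliteration of _compress_barriers: two range(size) loops, each re-filtering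
-- and sorting the obstacle set, with an inner run-compression loop threading (start, prev, out)
def compress_barriers_py (obstacles : List (Int × Int)) (size : Int) : List (List Int) × List (List Int) :=
  let horizontal : List (List Int) :=
    (PySem.List.pyRange 0 size).foldl (fun horizontal y =>
      let xs := PySem.List.sorted ((obstacles.filter (fun p => p.2 == y)).map Prod.fst) (fun v => v)
      match xs with
      | [] => horizontal
      | x0 :: tl =>
        let st := tl.foldl (fun (s : Int × Int × List (List Int)) x =>
            if x = s.2.1 + 1 then (s.1, x, s.2.2)
            else (x, x, s.2.2 ++ [[y, s.1, s.2.1]])) (x0, x0, horizontal)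
        st.2.2 ++ [[y, st.1, st.2.1]]) []
  let vertical : List (List Int) :=
    (PySem.List.pyRange 0 size).foldl (fun vertical x =>
      let ys := PySem.List.sorted ((obstacles.filter (fun p => p.1 == x)).map Prod.snd) (fun v => v)
      match ys with
      | [] => vertical
      | y0 :: tl =>
        let st := tl.foldl (fun (s : Int × Int × List (List Int)) y =>
            if y = s.2.1 + 1 then (s.1, y, s.2.2)
            else (y, y, s.2.2 ++ [[x, s.1, s.2.1]])) (y0, y0, vertical)
        st.2.2 ++ [[x, st.1, st.2.1]]) []
  (PySem.List.slice horizontal none (some 200), PySem.List.slice vertical none (some 200))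

-- ===== PORT B =====
-- Source B's helper `runs` after vals.sort(): the loop over vals[1:] with accumulator `out`
def pvRunsB (k : Int) : List Int → Int → Int → List (List Int) → List (List Int)
  | [], start, prev, out => out ++ [[k, start, prev]]
  | v :: rest, start, prev, out =>
    if v = prev + 1 then pvRunsB k rest start v out
    else pvRunsB k rest v v (out ++ [[k, start, prev]])

-- Source B's comprehension: occupied keys in sorted order, restricted to the grid, runs per key
def pvEmit (d : PySem.Dict Int (List Int)) (size : Int) : List (List Int) :=
  ((PySem.List.sorted d.keys (fun v => v)).filter (fun k => decide (0 ≤ k ∧ k < size))).flatMap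
    (fun k =>
      match PySem.List.sorted (d.getD k []) (fun v => v) with
      | [] => []   -- unreachable: a key of d has a nonempty bucket
      | v0 :: rest => pvRunsB k rest v0 v0 [])

def compress_barriers_py_alt (obstacles : List (Int × Int)) (size : Int) : List (List Int) × List (List Int) :=
  let rc := obstacles.foldl
    (fun (dc : PySem.Dict Int (List Int) × PySem.Dict Int (List Int)) p =>
      (dc.1.modify p.2 [] (fun l => l ++ [p.1]), dc.2.modify p.1 [] (fun l => l ++ [p.2])))
    (PySem.Dict.empty, PySem.Dict.empty)
  (PySem.List.slice (pvEmit rc.1 size) none (some 200),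
   PySem.List.slice (pvEmit rc.2 size) none (some 200))

-- ===== PRECONDITION & SPEC =====
def Spec_compress_barriers_py (obstacles : List (Int × Int)) (size : Int) (out : List (List Int) × List (List Int)) : Prop := out = compress_barriers_py_alt obstacles size
instance (obstacles : List (Int × Int)) (size : Int) (out : List (List Int) × List (List Int)) : Decidable (Spec_compress_barriers_py obstacles size out) := by unfold Spec_compress_barriers_py; infer_instance

-- ===== CLAIM (what is proved, stated in full; the proofs are below) =====
def Claim_equal_compress_barriers_py : Prop := ∀ (obstacles : List (Int × Int)) (size : Int), Dom_compress_barriers_py obstacles size → Spec_compress_barriers_py obstacles size (compress_barriers_py obstacles size)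

-- ===== LEMMAS AND PROOFS =====

-- A's side, generically: pts is the obstacle list viewed as (value, key) pairs
def pvRowsA (pts : List (Int × Int)) (size : Int) : List (List Int) :=
  (PySem.List.pyRange 0 size).foldl (fun acc y =>
    let xs := PySem.List.sorted ((pts.filter (fun p => p.2 == y)).map Prod.fst) (fun v => v)
    match xs with
    | [] => acc
    | x0 :: tl =>
      let st := tl.foldl (fun (s : Int × Int × List (List Int)) x =>
          if x = s.2.1 + 1 then (s.1, x, s.2.2)
          else (x, x, s.2.2 ++ [[y, s.1, s.2.1]])) (x0, x0, acc)
      st.2.2 ++ [[y, st.1, st.2.1]]) []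

-- B's dict, generically
def pvDictOf (pts : List (Int × Int)) : PySem.Dict Int (List Int) :=
  pts.foldl (fun d p => d.modify p.2 [] (fun l => l ++ [p.1])) PySem.Dict.empty

lemma pvRunsB_out (k : Int) (tl : List Int) : ∀ (s p : Int) (out : List (List Int)),
    pvRunsB k tl s p out = out ++ pvRunsB k tl s p [] := by
  induction tl with
  | nil => intro s p out; simp [pvRunsB]
  | cons v rest ih =>
    intro s p out
    simp only [pvRunsB]
    split_ifs with h
    · exact ih s v out
    · rw [ih v v (out ++ [[k, s, p]]), ih v v ([] ++ [[k, s, p]])]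
      simp

lemma pvInnerA (k : Int) (tl : List Int) : ∀ (s p : Int) (acc : List (List Int)),
    (tl.foldl (fun (st : Int × Int × List (List Int)) x =>
        if x = st.2.1 + 1 then (st.1, x, st.2.2)
        else (x, x, st.2.2 ++ [[k, st.1, st.2.1]])) (s, p, acc)).2.2 ++
      [[k, (tl.foldl (fun (st : Int × Int × List (List Int)) x =>
        if x = st.2.1 + 1 then (st.1, x, st.2.2)
        else (x, x, st.2.2 ++ [[k, st.1, st.2.1]])) (s, p, acc)).1,
        (tl.foldl (fun (st : Int × Int × List (List Int)) x =>
        if x = st.2.1 + 1 then (st.1, x, st.2.2)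
        else (x, x, st.2.2 ++ [[k, st.1, st.2.1]])) (s, p, acc)).2.1]] =
    pvRunsB k tl s p acc := by
  induction tl with
  | nil => intro s p acc; simp [pvRunsB]
  | cons v rest ih =>
    intro s p acc
    simp only [List.foldl_cons, pvRunsB]
    split_ifs with h
    · simpa [h] using ih s v acc
    · simpa [h] using ih v v (acc ++ [[k, s, p]])

-- bucket content = filtered values in input order
lemma pvDictOf_getD (pts : List (Int × Int)) (k : Int) :
    (pvDictOf pts).getD k [] = (pts.filter (fun p => p.2 == k)).map Prod.fst := by
  suffices h : ∀ d : PySem.Dict Int (List Int),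
      (pts.foldl (fun d p => d.modify p.2 [] (fun l => l ++ [p.1])) d).getD k [] =
        d.getD k [] ++ (pts.filter (fun p => p.2 == k)).map Prod.fst by
    simpa [pvDictOf, PySem.Dict.getD_empty] using h PySem.Dict.empty
  induction pts with
  | nil => intro d; simp
  | cons q rest ih =>
    intro d
    simp only [List.foldl_cons, List.filter_cons]
    by_cases hk : k = q.2
    · rw [ih]
      simp [hk]
    · rw [ih]
      have : (q.2 == k) = false := by simp; exact fun h => hk h.symm
      simp [PySem.Dict.getD_modify, hk, this]

lemma pvDictOf_mem_keys (pts : List (Int × Int)) (k : Int) :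
    k ∈ (pvDictOf pts).keys ↔ ∃ p ∈ pts, p.2 = k := by
  suffices h : ∀ d : PySem.Dict Int (List Int),
      (k ∈ (pts.foldl (fun d p => d.modify p.2 [] (fun l => l ++ [p.1])) d).keys ↔
        k ∈ d.keys ∨ ∃ p ∈ pts, p.2 = k) by
    simpa [pvDictOf, PySem.Dict.keys_empty] using h PySem.Dict.empty
  induction pts with
  | nil => intro d; simp
  | cons q rest ih =>
    intro d
    simp only [List.foldl_cons]
    rw [ih]
    simp only [PySem.Dict.keys_modify, PySem.Dict.mem_keys_insert, List.mem_cons]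
    constructor
    · rintro (⟨h | h⟩ | ⟨p, hp, hk⟩)
      · exact Or.inr ⟨q, Or.inl rfl, h.symm⟩
      · exact Or.inl h
      · exact Or.inr ⟨p, Or.inr hp, hk⟩
    · rintro (h | ⟨p, (rfl | hp), hk⟩)
      · exact Or.inl (Or.inr h)
      · exact Or.inl (Or.inl hk.symm)
      · exact Or.inr ⟨p, hp, hk⟩

lemma pvDictOf_nodup_keys (pts : List (Int × Int)) : (pvDictOf pts).keys.Nodup := by
  suffices h : ∀ d : PySem.Dict Int (List Int), d.keys.Nodup →
      (pts.foldl (fun d p => d.modify p.2 [] (fun l => l ++ [p.1])) d).keys.Nodup by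
    exact h PySem.Dict.empty (by simp [PySem.Dict.keys_empty])
  induction pts with
  | nil => intro d hd; simpa using hd
  | cons q rest ih =>
    intro d hd
    simp only [List.foldl_cons]
    exact ih _ (by rw [PySem.Dict.keys_modify]; exact PySem.Dict.nodup_keys_insert _ _ _ hd)

lemma pvPairwise_pyRange (a b : Int) : (PySem.List.pyRange a b).Pairwise (· < ·) := by
  by_cases h : a < b
  · rw [PySem.List.pyRange_one_cons h]
    refine List.Pairwise.cons (fun y hy => ?_) (pvPairwise_pyRange (a + 1) b)
    have := PySem.List.mem_pyRange_one.mp hy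
    omega
  · have : PySem.List.pyRange a b = [] := by
      rw [List.eq_nil_iff_forall_not_mem]
      intro x hx
      have := PySem.List.mem_pyRange_one.mp hx
      omega
    rw [this]; exact List.Pairwise.nil
termination_by (b - a).toNat
decreasing_by omega

lemma pvEqOfMemLt (l₁ l₂ : List Int) (h1 : l₁.Pairwise (· < ·)) (h2 : l₂.Pairwise (· < ·))
    (hm : ∀ x, x ∈ l₁ ↔ x ∈ l₂) : l₁ = l₂ := by
  have n1 : l₁.Nodup := List.Pairwise.imp (fun h => ne_of_lt h) h1
  have n2 : l₂.Nodup := List.Pairwise.imp (fun h => ne_of_lt h) h2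
  have hperm : l₁.Perm l₂ := (List.perm_ext_iff_of_nodup n1 n2).mpr hm
  exact PySem.List.eq_of_perm_of_pairwise_le_of_injective (fun v => v) (fun _ _ h => h)
    hperm (h1.imp le_of_lt) (h2.imp le_of_lt)

lemma pvFlatMap_filter (l : List Int) (q : Int → Bool) (g : Int → List (List Int))
    (h : ∀ y ∈ l, q y = false → g y = []) : l.flatMap g = (l.filter q).flatMap g := by
  induction l with
  | nil => simp
  | cons y rest ih =>
    simp only [List.flatMap_cons, List.filter_cons]
    by_cases hq : q y = true
    · simp only [hq, if_true, List.flatMap_cons]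
      rw [ih (fun z hz => h z (List.mem_cons_of_mem _ hz))]
    · have hq' : q y = false := by simpa using hq
      rw [hq', h y (List.mem_cons_self) hq',
        ih (fun z hz => h z (List.mem_cons_of_mem _ hz))]
      simp

-- the run emission both programs perform for key k, as a function of pts
def pvG (pts : List (Int × Int)) (k : Int) : List (List Int) :=
  match PySem.List.sorted ((pts.filter (fun p => p.2 == k)).map Prod.fst) (fun v => v) with
  | [] => []
  | x0 :: tl => pvRunsB k tl x0 x0 []

lemma pvG_nil (pts : List (Int × Int)) (k : Int) (h : ¬ ∃ p ∈ pts, p.2 = k) :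
    pvG pts k = [] := by
  have hf : pts.filter (fun p => p.2 == k) = [] := by
    rw [List.filter_eq_nil_iff]
    intro p hp
    simp only [beq_iff_eq]
    exact fun hk => h ⟨p, hp, by simpa using hk⟩
  simp only [pvG, hf]
  rfl

lemma pvRowsA_flatMap (pts : List (Int × Int)) (size : Int) :
    pvRowsA pts size = (PySem.List.pyRange 0 size).flatMap (pvG pts) := by
  unfold pvRowsA
  rw [PySem.List.foldl_congr_mem _ _ (fun acc y => acc ++ pvG pts y) _ ?_]
  · rw [PySem.List.foldl_append_eq_flatMap]
    simp
  · intro acc y _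
    simp only [pvG]
    cases hxs : PySem.List.sorted ((pts.filter (fun p => p.2 == y)).map Prod.fst) (fun v => v) with
    | nil => simp
    | cons x0 tl =>
      simp only
      rw [pvInnerA, pvRunsB_out]

lemma pvEmit_flatMap (pts : List (Int × Int)) (size : Int) :
    pvEmit (pvDictOf pts) size =
      (((PySem.List.sorted (pvDictOf pts).keys (fun v => v)).filter
          (fun k => decide (0 ≤ k ∧ k < size))).flatMap (pvG pts)) := by
  unfold pvEmit
  congr 1
  funext k
  rw [pvDictOf_getD]
  rfl

-- same occupied indices, in the same increasing order
lemma pvIndexLists (pts : List (Int × Int)) (size : Int) :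
    (PySem.List.pyRange 0 size).filter (fun y => (pvDictOf pts).keys.contains y) =
      (PySem.List.sorted (pvDictOf pts).keys (fun v => v)).filter
        (fun k => decide (0 ≤ k ∧ k < size)) := by
  apply pvEqOfMemLt
  · exact List.Pairwise.filter _ (pvPairwise_pyRange 0 size)
  · apply List.Pairwise.filter
    have hle := PySem.List.sorted_pairwise (pvDictOf pts).keys (fun v => v)
    have hnd : (PySem.List.sorted (pvDictOf pts).keys (fun v => v)).Nodup :=
      ((PySem.List.sorted_perm (pvDictOf pts).keys (fun v => v) false).nodup_iff).mpr
        (pvDictOf_nodup_keys pts)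
    exact (hle.and hnd).imp (fun h => lt_of_le_of_ne h.1 h.2)
  · intro x
    simp only [List.mem_filter, PySem.List.mem_pyRange_one,
      (PySem.List.sorted_perm (pvDictOf pts).keys (fun v => v) false).mem_iff,
      decide_eq_true_eq]
    constructor
    · rintro ⟨⟨h0, hs⟩, hc⟩
      exact ⟨by simpa using hc, h0, hs⟩
    · rintro ⟨hm, h0, hs⟩
      exact ⟨⟨h0, hs⟩, by simpa using hm⟩

-- the central lemma: A's range-scan equals B's bucket emission, one side at a time
lemma pvSide (pts : List (Int × Int)) (size : Int) :
    pvRowsA pts size = pvEmit (pvDictOf pts) size := by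
  rw [pvRowsA_flatMap, pvEmit_flatMap, ← pvIndexLists]
  apply pvFlatMap_filter
  intro y _ hc
  apply pvG_nil
  intro hex
  have : y ∈ (pvDictOf pts).keys := (pvDictOf_mem_keys pts y).mpr hex
  simp only [List.contains_eq_mem, decide_eq_false_iff_not] at hc
  exact hc this

lemma pvSwapFilter (pts : List (Int × Int)) (y : Int) :
    ((pts.map Prod.swap).filter (fun p => p.2 == y)).map Prod.fst =
      (pts.filter (fun p => p.1 == y)).map Prod.snd := by
  rw [List.filter_map]
  simp [Function.comp_def, Prod.swap]

lemma pvA_eq (obstacles : List (Int × Int)) (size : Int) :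
    compress_barriers_py obstacles size =
      (PySem.List.slice (pvRowsA obstacles size) none (some 200),
       PySem.List.slice (pvRowsA (obstacles.map Prod.swap) size) none (some 200)) := by
  simp only [compress_barriers_py, pvRowsA]
  congr 2
  apply PySem.List.foldl_congr_mem
  intro acc x _
  rw [pvSwapFilter]

lemma pvB_eq (obstacles : List (Int × Int)) (size : Int) :
    compress_barriers_py_alt obstacles size =
      (PySem.List.slice (pvEmit (pvDictOf obstacles) size) none (some 200),
       PySem.List.slice (pvEmit (pvDictOf (obstacles.map Prod.swap)) size) none (some 200)) := by
  have h := PySem.List.foldl_prod_mk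
    (fun (d : PySem.Dict Int (List Int)) (p : Int × Int) => d.modify p.2 [] (fun l => l ++ [p.1]))
    (fun (d : PySem.Dict Int (List Int)) (p : Int × Int) => d.modify p.1 [] (fun l => l ++ [p.2]))
    obstacles PySem.Dict.empty PySem.Dict.empty
  simp only [compress_barriers_py_alt, h, pvDictOf, List.foldl_map, Prod.fst_swap, Prod.snd_swap]

-- ===== VERDICT (by name: the statement is the Claim_ definition above) =====
theorem compress_barriers_py_spec : Claim_equal_compress_barriers_py := by
  intro obstacles size _
  show compress_barriers_py obstacles size = compress_barriers_py_alt obstacles size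
  rw [pvA_eq, pvB_eq, pvSide, pvSide]
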